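-- pv_equiv track=rewrite | github.com/YOU-JIE-hub/smart-mail-agent-ssot-pro | reports_auto/pack_stage/20250916T051048/tools/split_codebook.py | merge_to_limit
-- ===== SOURCE A (Python) =====
-- from typing import List, Tuple
--
-- Segment = Tuple[str, str, int]  # (title, text, approx_bytes)
--
-- def merge_to_limit(chunks: List[List[Segment]], max_parts: int) -> List[List[Segment]]:
--     """
--     若分組數仍 > 上限，合併相鄰且合併後大小最小的一對，重複直到 ≤ 上限。
--     保序、避免大幅失衡。
--     """
--     if max_parts <= 0:
--         return chunks
--     def chunk_size(c: List[Segment]) -> int: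
--         return sum(n for _,_,n in c)
--
--     while len(chunks) > max_parts:
--         # 計算相鄰兩組合併後的大小，找到最小者
--         best_i = None
--         best_sum = None
--         for i in range(len(chunks)-1):
--             s = chunk_size(chunks[i]) + chunk_size(chunks[i+1])
--             if best_sum is None or s < best_sum:
--                 best_sum = s
--                 best_i = i
--         # 合併 best_i 與 best_i+1
--         i = best_i  # type: ignore
--         merged = chunks[i] + chunks[i+1]
--         chunks = chunks[:i] + [merged] + chunks[i+2:]
--     return chunks
-- ===== SOURCE B (Python) =====
-- from typing import List, Tuple
--
-- Segment = Tuple[str, str, int]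
--
--
-- def _push(pq, item):
--     # insert item into the sorted list pq, after any equal entries
--     i = 0
--     while i < len(pq) and pq[i] <= item:
--         i += 1
--     pq.insert(i, item)
--
--
-- def merge_to_limit(chunks: List[List[Segment]], max_parts: int) -> List[List[Segment]]:
--     # Priority-queue algorithm: keep every candidate adjacent pair in a sorted
--     # queue keyed by (combined size, left index) with lazy deletion over a
--     # doubly linked list of live chunks, instead of rescanning all chunks
--     # for the minimum pair on every round.
--     if max_parts <= 0:
--         return chunks
--     n = len(chunks)
--     if n <= max_parts:
--         return chunks
--     data = list(chunks)
--     size = [sum(b for _, _, b in c) for c in chunks]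
--     nxt = list(range(1, n + 1))   # nxt[i] == n: no right neighbour
--     prv = list(range(-1, n - 1))  # prv[i] == -1: no left neighbour
--     alive = [True] * n
--     pq = []                       # sorted list of (pair_size, left, right)
--     for i in range(n - 1):
--         _push(pq, (size[i] + size[i + 1], i, i + 1))
--     parts = n
--     while parts > max_parts:
--         s, li, ri = pq.pop(0)
--         if not (alive[li] and nxt[li] == ri and size[li] + size[ri] == s):
--             continue              # stale entry, drop it
--         data[li] = data[li] + data[ri]
--         size[li] = s
--         alive[ri] = False
--         r2 = nxt[ri]
--         nxt[li] = r2
--         if r2 < n: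
--             prv[r2] = li
--             _push(pq, (size[li] + size[r2], li, r2))
--         p = prv[li]
--         if p >= 0:
--             _push(pq, (size[p] + size[li], p, li))
--         parts -= 1
--     return [data[i] for i in range(n) if alive[i]]
-- ===== Notes on version B (the rewrite author's own statement) =====
-- stated objective: alternative
-- what changed: B replaces A's per-round rescan of every chunk (re-summing every segment to find the cheapest adjacent pair) by a sorted priority queue of candidate adjacent pairs keyed by (combined size, left index) with lazy deletion of stale entries, over a doubly linked list of live chunks with incrementally maintained sizes; the (sum, position) key reproduces A's first-minimum tie-break exactly.
import Mathlib
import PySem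

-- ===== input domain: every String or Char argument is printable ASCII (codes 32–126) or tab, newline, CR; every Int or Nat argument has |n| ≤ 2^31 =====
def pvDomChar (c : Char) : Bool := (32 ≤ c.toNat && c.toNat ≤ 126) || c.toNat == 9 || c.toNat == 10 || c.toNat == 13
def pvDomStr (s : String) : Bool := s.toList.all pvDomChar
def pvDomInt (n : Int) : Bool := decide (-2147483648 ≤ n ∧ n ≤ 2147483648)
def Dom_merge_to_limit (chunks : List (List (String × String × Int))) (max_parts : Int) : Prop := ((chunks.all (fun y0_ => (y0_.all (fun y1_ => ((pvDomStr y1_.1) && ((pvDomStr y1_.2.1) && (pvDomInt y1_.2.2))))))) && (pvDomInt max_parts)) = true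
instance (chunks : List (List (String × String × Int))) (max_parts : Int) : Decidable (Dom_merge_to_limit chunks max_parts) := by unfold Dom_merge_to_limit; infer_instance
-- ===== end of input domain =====

-- B replaces A's per-round rescan of all chunks by a sorted priority queue of
-- candidate adjacent pairs (lazy deletion) over a doubly linked list of live
-- chunks with incrementally maintained sizes; same return value.

abbrev Seg := String × String × Int

-- ===== PORT A =====
-- chunk_size: sum(n for _,_,n in c)
def pvChunkSizeA (c : List Seg) : Int :=
  c.foldl (fun a t => a + t.2.2) 0

-- inner for-loop of A: state (best_i, best_sum), both starting as None;
-- chunks[i] is ported as getD i [] (every i reached is a valid index).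
def pvStepA (chunks : List (List Seg))
    (st : Option Nat × Option Int) (i : Nat) : Option Nat × Option Int :=
  let s := pvChunkSizeA (chunks.getD i []) + pvChunkSizeA (chunks.getD (i+1) [])
  match st.2 with
  | none => (some i, some s)
  | some bs => if s < bs then (some i, some s) else st

-- the while-loop; fuel = initial number of chunks bounds the iterations
-- (each merge shortens the list by one).
def pvLoopA (fuel : Nat) (chunks : List (List Seg)) (max_parts : Int) :
    List (List Seg) :=
  match fuel with
  | 0 => chunks
  | fuel + 1 =>
    if (chunks.length : Int) > max_parts then
      match ((List.range (chunks.length - 1)).foldl (pvStepA chunks) (none, none)).1 with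
      | none => chunks   -- unreachable totality guard (here len ≥ 2, so best_i is set)
      | some i =>
        pvLoopA fuel
          (chunks.take i ++ [chunks.getD i [] ++ chunks.getD (i+1) []] ++ chunks.drop (i+2))
          max_parts
    else chunks

def merge_to_limit (chunks : List (List Seg)) (max_parts : Int) : List (List Seg) :=
  if max_parts ≤ 0 then chunks else pvLoopA chunks.length chunks max_parts

-- ===== PORT B =====
-- All queue entries and linked-list indices produced by B's Python are
-- nonnegative, so they are ported as Nat (prv keeps the -1 sentinel, so Int).
def pvSizeB (c : List Seg) : Int :=
  c.foldl (fun a t => a + t.2.2) 0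

-- Python tuple comparison pq[i] <= item on (size, left, right) triples
def pvLeItem (x y : Int × Nat × Nat) : Bool :=
  decide (x.1 < y.1 ∨ (x.1 = y.1 ∧ (x.2.1 < y.2.1 ∨ (x.2.1 = y.2.1 ∧ x.2.2 ≤ y.2.2))))

-- _push: scan past entries <= item, insert there (keeps pq sorted)
def pvPush (pq : List (Int × Nat × Nat)) (item : Int × Nat × Nat) : List (Int × Nat × Nat) :=
  match pq with
  | [] => [item]
  | h :: t => if pvLeItem h item then h :: pvPush t item else item :: h :: t

-- the mutable state of B's while-loop
structure PvB where
  data : List (List Seg)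
  size : List Int
  nxt : List Nat
  prv : List Int
  alive : List Bool
  pq : List (Int × Nat × Nat)
  parts : Int

-- the body of one successful merge of pair (li, ri) with combined size s
def pvMergeStep (n : Nat) (st : PvB) (s : Int) (li ri : Nat)
    (rest : List (Int × Nat × Nat)) : PvB :=
  let data' := st.data.set li (st.data.getD li [] ++ st.data.getD ri [])
  let size' := st.size.set li s
  let alive' := st.alive.set ri false
  let r2 := st.nxt.getD ri n
  let nxt' := st.nxt.set li r2
  let prv' := if r2 < n then st.prv.set r2 (li : Int) else st.prv
  let pq1 := if r2 < n then pvPush rest (size'.getD li 0 + size'.getD r2 0, li, r2) else rest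
  let p := prv'.getD li (-1)
  let pq2 := if 0 ≤ p then pvPush pq1 (size'.getD p.toNat 0 + size'.getD li 0, p.toNat, li) else pq1
  ⟨data', size', nxt', prv', alive', pq2, st.parts - 1⟩

-- while parts > max_parts: pop, drop stale entries, merge; fuel bounds the pops
def pvLoopBQ (n : Nat) (mp : Int) : Nat → PvB → PvB
  | 0, st => st
  | f+1, st =>
    if st.parts > mp then
      match st.pq with
      | [] => st   -- unreachable totality guard (Python pop(0) would raise; pq is nonempty while parts > mp)
      | (s, li, ri) :: rest =>
        if st.alive.getD li false ∧ st.nxt.getD li n = ri ∧ st.size.getD li 0 + st.size.getD ri 0 = s then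
          pvLoopBQ n mp f (pvMergeStep n st s li ri rest)
        else
          pvLoopBQ n mp f { st with pq := rest }
    else st

-- the initial state (size list, identity linked list, initial pair queue)
def pvInitB (chunks : List (List Seg)) : PvB :=
  let n := chunks.length
  let size := chunks.map pvSizeB
  { data := chunks
    size := size
    nxt := (List.range n).map (· + 1)
    prv := (List.range n).map (fun (j : Nat) => (j : Int) - 1)
    alive := List.replicate n true
    pq := (List.range (n - 1)).foldl
      (fun pq i => pvPush pq (size.getD i 0 + size.getD (i+1) 0, i, i+1)) []
    parts := (n : Int) }

def merge_to_limit_alt (chunks : List (List Seg)) (max_parts : Int) : List (List Seg) :=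
  if max_parts ≤ 0 then chunks
  else if (chunks.length : Int) ≤ max_parts then chunks
  else
    let st := pvLoopBQ chunks.length max_parts (4 * chunks.length + 1) (pvInitB chunks)
    (List.range chunks.length).filterMap
      (fun i => if st.alive.getD i false then some (st.data.getD i []) else none)

-- ===== PRECONDITION & SPEC =====
def Spec_merge_to_limit (chunks : List (List (String × String × Int))) (max_parts : Int) (out : List (List (String × String × Int))) : Prop := out = merge_to_limit_alt chunks max_parts
instance (chunks : List (List (String × String × Int))) (max_parts : Int) (out : List (List (String × String × Int))) : Decidable (Spec_merge_to_limit chunks max_parts out) := by unfold Spec_merge_to_limit; infer_instance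

-- ===== CLAIM (what is proved, stated in full; the proofs are below) =====
def Claim_equal_merge_to_limit : Prop := ∀ (chunks : List (List (String × String × Int))) (max_parts : Int), Dom_merge_to_limit chunks max_parts → Spec_merge_to_limit chunks max_parts (merge_to_limit chunks max_parts)

-- ===== LEMMAS AND PROOFS =====

-- ---- small getD / getElem helpers ----
theorem pvGetD_set_self {α : Type} (l : List α) (i : Nat) (a d : α) (h : i < l.length) :
    (l.set i a).getD i d = a := by
  rw [List.getD_eq_getElem _ _ (by simpa using h)]
  simp [List.getElem_set_self]

theorem pvGetD_set_ne {α : Type} (l : List α) {i j : Nat} (a : α) (d : α) (h : i ≠ j) :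
    (l.set i a).getD j d = l.getD j d := by
  unfold List.getD
  rw [List.getElem?_set_ne h]

theorem pvGetD_map {α β : Type} (f : α → β) (l : List α) (i : Nat) (d : β) (d' : α)
    (h : i < l.length) : (l.map f).getD i d = f (l.getD i d') := by
  rw [List.getD_eq_getElem _ _ (by simpa using h), List.getD_eq_getElem _ _ h,
    List.getElem_map]

-- ---- pvLeItem is a linear order ----
theorem pvLeItem_refl (x : Int × Nat × Nat) : pvLeItem x x = true := by
  simp [pvLeItem]
theorem pvLeItem_trans {x y z : Int × Nat × Nat} (h1 : pvLeItem x y = true)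
    (h2 : pvLeItem y z = true) : pvLeItem x z = true := by
  simp only [pvLeItem, decide_eq_true_eq] at *
  omega
theorem pvLeItem_total {x y : Int × Nat × Nat} (h : ¬ pvLeItem x y = true) :
    pvLeItem y x = true := by
  simp only [pvLeItem, decide_eq_true_eq] at *
  omega
theorem pvLeItem_antisymm {x y : Int × Nat × Nat} (h1 : pvLeItem x y = true)
    (h2 : pvLeItem y x = true) : x = y := by
  simp only [pvLeItem, decide_eq_true_eq] at *
  obtain ⟨x1, x2, x3⟩ := x
  obtain ⟨y1, y2, y3⟩ := y
  simp_all only [Prod.mk.injEq]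
  omega

-- ---- pvPush ----
theorem pvMem_push (pq : List (Int × Nat × Nat)) (it x : Int × Nat × Nat) :
    x ∈ pvPush pq it ↔ x = it ∨ x ∈ pq := by
  induction pq with
  | nil => simp [pvPush]
  | cons h t ih =>
    rw [pvPush]
    split_ifs with hle
    · simp only [List.mem_cons, ih]
      tauto
    · simp only [List.mem_cons]

theorem pvLength_push (pq : List (Int × Nat × Nat)) (it : Int × Nat × Nat) :
    (pvPush pq it).length = pq.length + 1 := by
  induction pq with
  | nil => rfl
  | cons h t ih =>
    rw [pvPush]
    split_ifs with hle
    · simp [ih]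
    · simp

theorem pvPairwise_push (pq : List (Int × Nat × Nat)) (it : Int × Nat × Nat)
    (h : List.Pairwise (fun a b => pvLeItem a b = true) pq) :
    List.Pairwise (fun a b => pvLeItem a b = true) (pvPush pq it) := by
  induction pq with
  | nil => simp [pvPush]
  | cons hd t ih =>
    rw [List.pairwise_cons] at h
    rw [pvPush]
    split_ifs with hle
    · rw [List.pairwise_cons]
      refine ⟨?_, ih h.2⟩
      intro b hb
      rcases (pvMem_push t it b).mp hb with rfl | hb
      · exact hle
      · exact h.1 b hb
    · rw [List.pairwise_cons]
      refine ⟨?_, List.pairwise_cons.mpr h⟩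
      intro b hb
      rcases List.mem_cons.mp hb with rfl | hb
      · exact pvLeItem_total hle
      · exact pvLeItem_trans (pvLeItem_total hle) (h.1 b hb)

theorem pvHead_min {h : Int × Nat × Nat} {t : List (Int × Nat × Nat)}
    (hs : List.Pairwise (fun a b => pvLeItem a b = true) (h :: t))
    {e : Int × Nat × Nat} (he : e ∈ h :: t) : pvLeItem h e = true := by
  rcases List.mem_cons.mp he with rfl | he
  · exact pvLeItem_refl e
  · exact (List.pairwise_cons.mp hs).1 e he

-- ---- characterisation of A's argmin fold ----
def pvPairSum (cs : List (List Seg)) (i : Nat) : Int :=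
  pvChunkSizeA (cs.getD i []) + pvChunkSizeA (cs.getD (i+1) [])

theorem pvGetD_range (n i d : Nat) (h : i < n) : (List.range n).getD i d = i := by
  rw [List.getD_eq_getElem _ _ (by simpa using h)]
  simp

theorem pvGetD_mem {L : List Nat} {i : Nat} (h : i < L.length) : L.getD i 0 ∈ L := by
  rw [List.getD_eq_getElem _ _ h]
  exact List.getElem_mem h

theorem pvStepA_none (cs : List (List Seg)) (j : Nat) :
    pvStepA cs (none, none) j = (some j, some (pvPairSum cs j)) := rfl

theorem pvStepA_some (cs : List (List Seg)) (i : Nat) (s : Int) (j : Nat) :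
    pvStepA cs (some i, some s) j
      = if pvPairSum cs j < s then (some j, some (pvPairSum cs j)) else (some i, some s) := rfl

theorem pvFoldA_spec (cs : List (List Seg)) (m : Nat) (hm : 0 < m) :
    ∃ i s, (List.range m).foldl (pvStepA cs) (none, none) = (some i, some s) ∧
      i < m ∧ s = pvPairSum cs i ∧ (∀ j, j < m → s ≤ pvPairSum cs j) ∧
      (∀ j, j < i → s < pvPairSum cs j) := by
  induction m with
  | zero => omega
  | succ m ih =>
    rcases Nat.eq_zero_or_pos m with rfl | hm'
    · refine ⟨0, pvPairSum cs 0, ?_, Nat.zero_lt_one, rfl, ?_, ?_⟩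
      · rw [List.range_one]
        simp only [List.foldl_cons, List.foldl_nil, pvStepA_none]
      · intro j hj
        interval_cases j
        exact le_refl _
      · intro j hj; omega
    · obtain ⟨i, s, hfold, hi, hs, hmin, hstrict⟩ := ih hm'
      rw [List.range_succ, List.foldl_append, hfold]
      simp only [List.foldl_cons, List.foldl_nil, pvStepA_some]
      by_cases hlt : pvPairSum cs m < s
      · rw [if_pos hlt]
        refine ⟨m, pvPairSum cs m, rfl, by omega, rfl, ?_, ?_⟩
        · intro j hj
          rcases Nat.lt_succ_iff_lt_or_eq.mp hj with h | rfl
          · exact le_of_lt (lt_of_lt_of_le hlt (hmin j h))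
          · exact le_refl _
        · intro j hj
          exact lt_of_lt_of_le hlt (hmin j hj)
      · rw [if_neg hlt]
        refine ⟨i, s, rfl, by omega, hs, ?_, hstrict⟩
        intro j hj
        rcases Nat.lt_succ_iff_lt_or_eq.mp hj with h | rfl
        · exact hmin j h
        · omega

-- ---- the simulation invariant ----
def pvTriple (size : List Int) (L : List Nat) (i : Nat) : Int × Nat × Nat :=
  (size.getD (L.getD i 0) 0 + size.getD (L.getD (i+1) 0) 0, L.getD i 0, L.getD (i+1) 0)

structure PvInv (n : Nat) (L : List Nat) (st : PvB) : Prop where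
  hdl : st.data.length = n
  hsl : st.size.length = n
  hnl : st.nxt.length = n
  hpl : st.prv.length = n
  hal : st.alive.length = n
  hLn : ∀ x ∈ L, x < n
  hLmono : List.Pairwise (· < ·) L
  halive : ∀ j : Nat, st.alive.getD j false = decide (j ∈ L)
  hsize : ∀ j ∈ L, st.size.getD j 0 = pvChunkSizeA (st.data.getD j [])
  hnxt : ∀ i, i < L.length → st.nxt.getD (L.getD i 0) n = (if i + 1 < L.length then L.getD (i+1) 0 else n)
  hprv : ∀ i, i < L.length → st.prv.getD (L.getD i 0) (-1) = (if i = 0 then (-1 : Int) else (L.getD (i-1) 0 : Int))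
  hsorted : List.Pairwise (fun a b => pvLeItem a b = true) st.pq
  hcomp : ∀ i, i + 1 < L.length → pvTriple st.size L i ∈ st.pq
  hrange : ∀ e ∈ st.pq, e.2.1 < n ∧ e.2.2 < n
  hparts : st.parts = (L.length : Int)

-- positions of a <-pairwise list are strictly monotone / injective
theorem pvL_mono {L : List Nat} (h : List.Pairwise (· < ·) L) {i j : Nat}
    (hij : i < j) (hj : j < L.length) : L.getD i 0 < L.getD j 0 := by
  rw [List.getD_eq_getElem _ _ (by omega), List.getD_eq_getElem _ _ hj]
  exact List.pairwise_iff_getElem.mp h i j _ _ hij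

theorem pvL_inj {L : List Nat} (h : List.Pairwise (· < ·) L) {i j : Nat}
    (hi : i < L.length) (hj : j < L.length) (he : L.getD i 0 = L.getD j 0) : i = j := by
  rcases Nat.lt_trichotomy i j with hlt | rfl | hlt
  · exact absurd he (Nat.ne_of_lt (pvL_mono h hlt hj))
  · rfl
  · exact absurd he.symm (Nat.ne_of_lt (pvL_mono h hlt hi))

-- the final comprehension returns the live chunks in order
def pvFinal (n : Nat) (st : PvB) : List (List Seg) :=
  (List.range n).filterMap
    (fun i => if st.alive.getD i false then some (st.data.getD i []) else none)

theorem pvFilterMap_congr {α : Type} (l : List Nat) (f g : Nat → Option α)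
    (h : ∀ a ∈ l, f a = g a) : l.filterMap f = l.filterMap g := by
  induction l with
  | nil => rfl
  | cons a t ih =>
    rw [List.filterMap_cons, List.filterMap_cons, h a (List.mem_cons_self ..),
      ih (fun x hx => h x (List.mem_cons_of_mem _ hx))]

theorem pvSortedLast {L : List Nat} {n : Nat} (hmono : List.Pairwise (· < ·) L)
    (hb : ∀ x ∈ L, x < n + 1) (hn : n ∈ L) :
    ∃ L', L = L' ++ [n] ∧ List.Pairwise (· < ·) L' ∧ ∀ x ∈ L', x < n := by
  induction L with
  | nil => cases hn
  | cons a t ih =>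
    rcases List.mem_cons.mp hn with hna | hnt
    · cases t with
      | nil => exact ⟨[], by simp [hna], List.Pairwise.nil, by simp⟩
      | cons c t2 =>
        have h1 : a < c := (List.pairwise_cons.mp hmono).1 c (List.mem_cons_self ..)
        have h2 : c < n + 1 := hb c (by simp)
        exact ((by omega : False)).elim
    · obtain ⟨L', hL, hp, hlt⟩ := ih (List.pairwise_cons.mp hmono).2
        (fun x hx => hb x (List.mem_cons_of_mem _ hx)) hnt
      refine ⟨a :: L', by rw [hL]; rfl, ?_, ?_⟩
      · rw [List.pairwise_cons]
        refine ⟨?_, hp⟩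
        intro b hbm
        exact (List.pairwise_cons.mp hmono).1 b (by rw [hL]; exact List.mem_append_left _ hbm)
      · intro x hx
        rcases List.mem_cons.mp hx with rfl | hx
        · exact (List.pairwise_cons.mp hmono).1 n hnt
        · exact hlt x hx

theorem pvFilterMap_range {α : Type} (g : Nat → α) :
    ∀ (n : Nat) (L : List Nat), List.Pairwise (· < ·) L → (∀ x ∈ L, x < n) →
    (List.range n).filterMap (fun i => if i ∈ L then some (g i) else none) = L.map g := by
  intro n
  induction n with
  | zero =>
    intro L _ hb
    cases L with
    | nil => rfl
    | cons a t => exact absurd (hb a (by simp)) (by omega)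
  | succ n ih =>
    intro L hmono hb
    rw [List.range_succ, List.filterMap_append]
    by_cases hn : n ∈ L
    · obtain ⟨L', rfl, hp, hlt⟩ := pvSortedLast hmono hb hn
      rw [pvFilterMap_congr (List.range n) _ (fun i => if i ∈ L' then some (g i) else none)
        (fun a ha => ?_), ih L' hp hlt]
      · have hnn : n ∈ L' ++ [n] := List.mem_append_right _ (by simp)
        rw [List.map_append]
        simp
      · have han : a < n := List.mem_range.mp ha
        show (if a ∈ L' ++ [n] then some (g a) else none) = (if a ∈ L' then some (g a) else none)
        by_cases haL : a ∈ L'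
        · rw [if_pos haL, if_pos (List.mem_append_left _ haL)]
        · rw [if_neg haL, if_neg ?_]
          intro hcon
          rcases List.mem_append.mp hcon with h | h
          · exact haL h
          · simp at h
            omega
    · have hb' : ∀ x ∈ L, x < n := by
        intro x hx
        have h1 := hb x hx
        have : x ≠ n := fun h => hn (h ▸ hx)
        omega
      rw [ih L hmono hb']
      simp [hn]

theorem pvFinal_eq {n : Nat} {L : List Nat} {st : PvB} (hInv : PvInv n L st) :
    pvFinal n st = L.map (fun j => st.data.getD j []) := by
  unfold pvFinal
  rw [pvFilterMap_congr (List.range n) _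
    (fun i => if i ∈ L then some (st.data.getD i []) else none) (fun i _ => ?_),
    pvFilterMap_range _ n L hInv.hLmono hInv.hLn]
  rw [hInv.halive i]
  by_cases h : i ∈ L <;> simp [h]

-- pair sums of the abstract chunk list are the maintained sizes
theorem pvPairSum_abs {n : Nat} {L : List Nat} {st : PvB} (hInv : PvInv n L st)
    {i : Nat} (hi : i + 1 < L.length) :
    pvPairSum (L.map (fun j => st.data.getD j [])) i
      = st.size.getD (L.getD i 0) 0 + st.size.getD (L.getD (i+1) 0) 0 := by
  unfold pvPairSum
  rw [pvGetD_map _ L i [] 0 (by omega), pvGetD_map _ L (i+1) [] 0 hi,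
    hInv.hsize _ (pvGetD_mem (i := i) (by omega)), hInv.hsize _ (pvGetD_mem hi)]

-- a valid head of the queue is the triple of A's argmin position
theorem pvHeadArgmin {n : Nat} {L : List Nat} {st : PvB} (hInv : PvInv n L st)
    {s : Int} {li ri : Nat} {rest : List (Int × Nat × Nat)}
    (hpq : st.pq = (s, li, ri) :: rest)
    (hv : st.alive.getD li false = true ∧ st.nxt.getD li n = ri ∧
      st.size.getD li 0 + st.size.getD ri 0 = s) (hlen : 2 ≤ L.length) :
    ∃ t, t + 1 < L.length ∧ (s, li, ri) = pvTriple st.size L t ∧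
      ((List.range ((L.map (fun j => st.data.getD j [])).length - 1)).foldl
        (pvStepA (L.map (fun j => st.data.getD j []))) (none, none)).1 = some t := by
  have hmem : li ∈ L := by
    have h1 := hInv.halive li
    rw [hv.1] at h1
    exact of_decide_eq_true h1.symm
  obtain ⟨t, htl, hLt⟩ := List.getElem_of_mem hmem
  have hLtD : L.getD t 0 = li := by rw [List.getD_eq_getElem _ _ htl, hLt]
  have hri : ri < n := (hInv.hrange _ (by rw [hpq]; exact List.mem_cons_self ..)).2
  have hnx := hInv.hnxt t htl
  rw [hLtD, hv.2.1] at hnx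
  have ht1 : t + 1 < L.length := by
    by_contra hcon
    rw [if_neg hcon] at hnx
    omega
  rw [if_pos ht1] at hnx
  have htrip : (s, li, ri) = pvTriple st.size L t := by
    unfold pvTriple
    rw [hLtD, ← hnx, hv.2.2]
  set cs := L.map (fun j => st.data.getD j []) with hcs
  have hcl : cs.length = L.length := by simp [hcs]
  obtain ⟨i0, s0, hfold, hi0, hs0, hmin, hstrict⟩ := pvFoldA_spec cs (cs.length - 1) (by omega)
  have hi0' : i0 + 1 < L.length := by omega
  have habs_i0 := pvPairSum_abs hInv hi0'
  have habs_t := pvPairSum_abs hInv ht1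
  rw [← hcs] at habs_i0 habs_t
  have le1 : pvLeItem (pvTriple st.size L t) (pvTriple st.size L i0) = true := by
    rw [← htrip]
    exact pvHead_min (hpq ▸ hInv.hsorted) (hpq ▸ hInv.hcomp i0 hi0')
  have le2 : pvLeItem (pvTriple st.size L i0) (pvTriple st.size L t) = true := by
    by_cases heq : i0 = t
    · rw [heq]; exact pvLeItem_refl _
    · have hle : s0 ≤ pvPairSum cs t := hmin t (by omega)
      by_cases hslt : s0 < pvPairSum cs t
      · simp only [pvTriple, pvLeItem, decide_eq_true_eq]
        omega
      · have hseq : s0 = pvPairSum cs t := by omega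
        have hi0t : i0 < t := by
          rcases Nat.lt_or_ge i0 t with h | h
          · exact h
          · have : t < i0 := by omega
            have := hstrict t this
            omega
        have hml := pvL_mono hInv.hLmono hi0t (by omega)
        simp only [pvTriple, pvLeItem, decide_eq_true_eq]
        omega
  have heqt : pvTriple st.size L i0 = pvTriple st.size L t := pvLeItem_antisymm le2 le1
  have ht_eq : i0 = t := by
    apply pvL_inj hInv.hLmono (by omega) (by omega)
    have := congrArg (fun x => x.2.1) heqt
    simpa [pvTriple] using this
  refine ⟨t, ht1, htrip, ?_⟩
  rw [hfold]
  exact congrArg some ht_eq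

-- dropping a stale head keeps the invariant
theorem pvInv_drop {n : Nat} {L : List Nat} {st : PvB}
    {s : Int} {li ri : Nat} {rest : List (Int × Nat × Nat)}
    (hInv : PvInv n L st) (hpq : st.pq = (s, li, ri) :: rest)
    (hv : ¬ (st.alive.getD li false = true ∧ st.nxt.getD li n = ri ∧
      st.size.getD li 0 + st.size.getD ri 0 = s)) :
    PvInv n L { st with pq := rest } := by
  have hpw := hInv.hsorted
  rw [hpq] at hpw
  refine { hdl := hInv.hdl, hsl := hInv.hsl, hnl := hInv.hnl, hpl := hInv.hpl, hal := hInv.hal,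
           hLn := hInv.hLn, hLmono := hInv.hLmono, halive := hInv.halive, hsize := hInv.hsize,
           hnxt := hInv.hnxt, hprv := hInv.hprv,
           hsorted := (List.pairwise_cons.mp hpw).2,
           hcomp := ?_,
           hrange := fun e he => hInv.hrange e (by rw [hpq]; exact List.mem_cons_of_mem _ he),
           hparts := hInv.hparts }
  intro i hi
  have hmem := hInv.hcomp i hi
  rw [hpq] at hmem
  rcases List.mem_cons.mp hmem with heq | hm
  · exfalso
    apply hv
    have h1 : L.getD i 0 = li := by
      have := congrArg (fun x => x.2.1) heq
      simpa [pvTriple] using this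
    have h2 : L.getD (i+1) 0 = ri := by
      have := congrArg (fun x => x.2.2) heq
      simpa [pvTriple] using this
    have h3 : st.size.getD (L.getD i 0) 0 + st.size.getD (L.getD (i+1) 0) 0 = s := by
      have := congrArg (fun x => x.1) heq
      simpa [pvTriple] using this
    refine ⟨?_, ?_, ?_⟩
    · rw [hInv.halive li]
      simp only [decide_eq_true_eq]
      rw [← h1]
      exact pvGetD_mem (by omega)
    · have hx := hInv.hnxt i (by omega)
      rw [if_pos hi] at hx
      rw [← h1, hx, h2]
    · rw [← h1, ← h2, h3]
  · exact hm

theorem pvPqLen_merge (n : Nat) (st : PvB) (s : Int) (li ri : Nat)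
    (rest : List (Int × Nat × Nat)) :
    (pvMergeStep n st s li ri rest).pq.length ≤ rest.length + 2 := by
  unfold pvMergeStep
  dsimp only
  split_ifs <;> simp [pvLength_push]

-- ---- the initial state ----
theorem pvInitPq_spec (size : List Int) (m : Nat) :
    List.Pairwise (fun a b => pvLeItem a b = true)
      ((List.range m).foldl (fun pq i => pvPush pq (size.getD i 0 + size.getD (i+1) 0, i, i+1)) [])
    ∧ (∀ j, j < m → (size.getD j 0 + size.getD (j+1) 0, j, j+1)
        ∈ (List.range m).foldl (fun pq i => pvPush pq (size.getD i 0 + size.getD (i+1) 0, i, i+1)) [])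
    ∧ (∀ e ∈ (List.range m).foldl (fun pq i => pvPush pq (size.getD i 0 + size.getD (i+1) 0, i, i+1)) [],
        ∃ j, j < m ∧ e = (size.getD j 0 + size.getD (j+1) 0, j, j+1))
    ∧ ((List.range m).foldl (fun pq i => pvPush pq (size.getD i 0 + size.getD (i+1) 0, i, i+1)) []).length = m := by
  induction m with
  | zero => simp
  | succ m ih =>
    rw [List.range_succ, List.foldl_append]
    simp only [List.foldl_cons, List.foldl_nil]
    obtain ⟨h1, h2, h3, h4⟩ := ih
    refine ⟨pvPairwise_push _ _ h1, ?_, ?_, by rw [pvLength_push, h4]⟩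
    · intro j hj
      rcases Nat.lt_succ_iff_lt_or_eq.mp hj with h | rfl
      · exact (pvMem_push _ _ _).mpr (Or.inr (h2 j h))
      · exact (pvMem_push _ _ _).mpr (Or.inl rfl)
    · intro e he
      rcases (pvMem_push _ _ _).mp he with rfl | he
      · exact ⟨m, by omega, rfl⟩
      · obtain ⟨j, hj, he⟩ := h3 e he
        exact ⟨j, by omega, he⟩

theorem pvInv_init (chunks : List (List Seg)) :
    PvInv chunks.length (List.range chunks.length) (pvInitB chunks) := by
  obtain ⟨h1, h2, h3, h4⟩ := pvInitPq_spec (chunks.map pvSizeB) (chunks.length - 1)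
  refine { hdl := rfl, hsl := by simp [pvInitB], hnl := by simp [pvInitB],
           hpl := by simp [pvInitB], hal := by simp [pvInitB],
           hLn := fun x hx => List.mem_range.mp hx,
           hLmono := List.pairwise_lt_range,
           halive := ?_, hsize := ?_, hnxt := ?_, hprv := ?_,
           hsorted := h1, hcomp := ?_, hrange := ?_, hparts := by simp [pvInitB] }
  · intro j
    by_cases h : j < chunks.length
    · rw [List.getD_eq_getElem _ _ (by simpa [pvInitB] using h)]
      simp [pvInitB, h]
    · rw [List.getD_eq_default _ _ (by simpa [pvInitB] using Nat.le_of_not_lt h)]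
      simp [List.mem_range]
      omega
  · intro j hj
    have h : j < chunks.length := List.mem_range.mp hj
    show (chunks.map pvSizeB).getD j 0 = pvChunkSizeA (chunks.getD j [])
    rw [pvGetD_map pvSizeB chunks j 0 [] h]
    rfl
  · intro i hi
    rw [List.length_range] at hi
    rw [pvGetD_range _ _ _ hi]
    show ((List.range chunks.length).map (· + 1)).getD i chunks.length = _
    rw [pvGetD_map _ _ i _ 0 (by simpa using hi), pvGetD_range _ _ _ hi]
    rw [List.length_range]
    by_cases h : i + 1 < chunks.length
    · rw [if_pos h, pvGetD_range _ _ _ h]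
    · rw [if_neg h]
      omega
  · intro i hi
    rw [List.length_range] at hi
    rw [pvGetD_range _ _ _ hi]
    have hl : (pvInitB chunks).prv.getD i (-1) = (i : Int) - 1 := by
      have hpr : (pvInitB chunks).prv
          = (List.range chunks.length).map (fun (j : Nat) => (j : Int) - 1) := rfl
      rw [hpr, List.getD_eq_getElem _ _ (by simpa using hi), List.getElem_map, List.getElem_range]
    rw [hl, pvGetD_range _ _ _ (show i - 1 < chunks.length by omega)]
    split_ifs with h <;> omega
  · intro i hi
    rw [List.length_range] at hi
    show pvTriple (chunks.map pvSizeB) (List.range chunks.length) i ∈ _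
    unfold pvTriple
    rw [pvGetD_range _ _ _ (by omega), pvGetD_range _ _ _ hi]
    exact h2 i (by omega)
  · intro e he
    obtain ⟨j, hj, rfl⟩ := h3 e he
    refine ⟨?_, ?_⟩ <;> simp <;> omega

theorem pvInit_abs (chunks : List (List Seg)) :
    (List.range chunks.length).map (fun j => (pvInitB chunks).data.getD j []) = chunks := by
  apply List.ext_getElem (by simp)
  intro i h1 h2
  show ((List.range chunks.length).map (fun j => chunks.getD j []))[i] = _
  rw [List.getElem_map, List.getElem_range, List.getD_eq_getElem _ _ h2]

theorem pvInit_pqlen (chunks : List (List Seg)) :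
    (pvInitB chunks).pq.length = chunks.length - 1 :=
  (pvInitPq_spec (chunks.map pvSizeB) (chunks.length - 1)).2.2.2

theorem pvFoldAdd (l : List Seg) (s : Int) :
    l.foldl (fun a t => a + t.2.2) s = s + l.foldl (fun a t => a + t.2.2) 0 := by
  induction l generalizing s with
  | nil => simp
  | cons h t ih =>
    rw [List.foldl_cons, List.foldl_cons, ih (s + h.2.2), ih (0 + h.2.2)]
    ring

theorem pvChunkSizeA_append (x y : List Seg) :
    pvChunkSizeA (x ++ y) = pvChunkSizeA x + pvChunkSizeA y := by
  unfold pvChunkSizeA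
  rw [List.foldl_append, pvFoldAdd]

theorem pvMergeStep_pq (n : Nat) (st : PvB) (s : Int) (li ri : Nat)
    (rest : List (Int × Nat × Nat)) :
    (pvMergeStep n st s li ri rest).pq =
      (let size' := st.size.set li s
       let r2 := st.nxt.getD ri n
       let prv' := if r2 < n then st.prv.set r2 (li : Int) else st.prv
       let pq1 := if r2 < n then pvPush rest (size'.getD li 0 + size'.getD r2 0, li, r2) else rest
       let p := prv'.getD li (-1)
       if 0 ≤ p then pvPush pq1 (size'.getD p.toNat 0 + size'.getD li 0, p.toNat, li) else pq1) := rfl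

-- merging the argmin pair re-establishes the invariant
theorem pvInv_merge {n : Nat} {L : List Nat} {st : PvB} {t : Nat}
    {rest : List (Int × Nat × Nat)}
    (hInv : PvInv n L st) (ht : t + 1 < L.length)
    (hpq : st.pq = pvTriple st.size L t :: rest) :
    PvInv n (L.eraseIdx (t+1))
      (pvMergeStep n st (pvTriple st.size L t).1 (L.getD t 0) (L.getD (t+1) 0) rest) := by
  obtain ⟨hdl, hsl, hnl, hpl, hal, hLn, hLmono, halive, hsize, hnxt, hprv, hsorted, hcomp, hrange, hparts⟩ := hInv
  have hs' : (pvTriple st.size L t).1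
      = st.size.getD (L.getD t 0) 0 + st.size.getD (L.getD (t+1) 0) 0 := rfl
  have htL : t < L.length := by omega
  have ha_mem : L.getD t 0 ∈ L := pvGetD_mem htL
  have hb_mem : L.getD (t+1) 0 ∈ L := pvGetD_mem ht
  have han : L.getD t 0 < n := hLn _ ha_mem
  have hbn : L.getD (t+1) 0 < n := hLn _ hb_mem
  have hne' : ∀ j k, j < L.length → k < L.length → j ≠ k → L.getD j 0 ≠ L.getD k 0 :=
    fun j k hj hk hne h => hne (pvL_inj hLmono hj hk h)
  have hr2 : st.nxt.getD (L.getD (t+1) 0) n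
      = if t + 2 < L.length then L.getD (t+2) 0 else n := hnxt (t+1) ht
  have hlen' : (L.eraseIdx (t+1)).length = L.length - 1 := by
    rw [List.length_eraseIdx, if_pos ht]
  have hgetD' : ∀ i, i < L.length - 1 →
      (L.eraseIdx (t+1)).getD i 0 = if i < t + 1 then L.getD i 0 else L.getD (i+1) 0 := by
    intro i hi
    rw [List.getD_eq_getElem _ _ (show i < (L.eraseIdx (t+1)).length by omega),
      List.getElem_eraseIdx]
    by_cases h : i < t + 1
    · rw [dif_pos h, if_pos h, List.getD_eq_getElem _ _ (by omega)]
    · rw [dif_neg h, if_neg h, List.getD_eq_getElem _ _ (by omega)]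
  have hbElem : L[t+1] = L.getD (t+1) 0 := (List.getD_eq_getElem L 0 ht).symm
  have hmono' : List.Pairwise (· < ·) (L.eraseIdx (t+1)) :=
    List.Pairwise.sublist (List.eraseIdx_sublist L (t+1)) hLmono
  have hmem' : ∀ j, j ∈ L.eraseIdx (t+1) ↔ (j ∈ L ∧ j ≠ L.getD (t+1) 0) := by
    intro j
    constructor
    · intro hj
      obtain ⟨i, hiL, hne, hEq⟩ := List.mem_eraseIdx_iff_getElem.mp hj
      refine ⟨hEq ▸ List.getElem_mem hiL, ?_⟩
      intro hcon
      apply hne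
      apply pvL_inj hLmono hiL ht
      rw [List.getD_eq_getElem _ _ hiL, List.getD_eq_getElem _ _ ht, hEq, hcon]
      exact hbElem.symm
    · rintro ⟨hjL, hne⟩
      obtain ⟨i, hiL, hEq⟩ := List.getElem_of_mem hjL
      apply List.mem_eraseIdx_iff_getElem.mpr
      refine ⟨i, hiL, ?_, hEq⟩
      intro hcon
      apply hne
      subst hcon
      rw [← hEq, hbElem]
  have hnodup_b : L.getD (t+1) 0 ∉ L.eraseIdx (t+1) := fun h => ((hmem' _).mp h).2 rfl
  have hrest_sorted : List.Pairwise (fun x y => pvLeItem x y = true) rest :=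
    (List.pairwise_cons.mp (hpq ▸ hsorted)).2
  have hmem_rest : ∀ i, i + 1 < L.length → i ≠ t → pvTriple st.size L i ∈ rest := by
    intro i hi1 hne
    have hm := hcomp i hi1
    rw [hpq] at hm
    rcases List.mem_cons.mp hm with he | hm
    · exfalso
      apply hne
      apply pvL_inj hLmono (by omega) htL
      have := congrArg (fun x => x.2.1) he
      simpa [pvTriple] using this
    · exact hm
  have hq_sorted : List.Pairwise (fun x y => pvLeItem x y = true)
      (pvMergeStep n st (pvTriple st.size L t).1 (L.getD t 0) (L.getD (t+1) 0) rest).pq := by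
    rw [pvMergeStep_pq]
    simp only []
    split_ifs <;>
      first
        | exact pvPairwise_push _ _ (pvPairwise_push _ _ hrest_sorted)
        | exact pvPairwise_push _ _ hrest_sorted
        | exact hrest_sorted
  have hsetA : (st.size.set (L.getD t 0) (pvTriple st.size L t).1).getD (L.getD t 0) 0
      = (pvTriple st.size L t).1 :=
    pvGetD_set_self st.size _ _ 0 (by rw [hsl]; exact han)
  have hq_mem : ∀ x, x ∈ (pvMergeStep n st (pvTriple st.size L t).1 (L.getD t 0) (L.getD (t+1) 0) rest).pq ↔
      ((t + 2 < L.length ∧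
          x = ((pvTriple st.size L t).1 + st.size.getD (L.getD (t+2) 0) 0, L.getD t 0, L.getD (t+2) 0))
        ∨ (0 < t ∧
          x = (st.size.getD (L.getD (t-1) 0) 0 + (pvTriple st.size L t).1, L.getD (t-1) 0, L.getD t 0))
        ∨ x ∈ rest) := by
    intro x
    rw [pvMergeStep_pq]
    simp only []
    by_cases hc2 : t + 2 < L.length
    · have hr2v : st.nxt.getD (L.getD (t+1) 0) n = L.getD (t+2) 0 := by rw [hr2, if_pos hc2]
      have hr2n : L.getD (t+2) 0 < n := hLn _ (pvGetD_mem (by omega))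
      have hr2a : L.getD (t+2) 0 ≠ L.getD t 0 := hne' _ _ (by omega) htL (by omega)
      rw [hr2v, if_pos hr2n, if_pos hr2n, pvGetD_set_ne st.prv _ _ hr2a, hprv t htL,
        pvGetD_set_ne st.size _ 0 (fun h => hr2a h.symm), hsetA]
      by_cases hc0 : t = 0
      · rw [if_pos hc0, if_neg (by omega : ¬ (0:Int) ≤ -1), pvMem_push]
        constructor
        · rintro (rfl | hx)
          · exact Or.inl ⟨hc2, rfl⟩
          · exact Or.inr (Or.inr hx)
        · rintro (⟨_, rfl⟩ | ⟨ht0, _⟩ | hx)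
          · exact Or.inl rfl
          · omega
          · exact Or.inr hx
      · have hprevA : L.getD (t-1) 0 ≠ L.getD t 0 := hne' _ _ (by omega) htL (by omega)
        rw [if_neg hc0, if_pos (Int.natCast_nonneg _), Int.toNat_natCast,
          pvGetD_set_ne st.size _ 0 (fun h => hprevA h.symm),
          pvMem_push, pvMem_push]
        constructor
        · rintro (rfl | rfl | hx)
          · exact Or.inr (Or.inl ⟨by omega, rfl⟩)
          · exact Or.inl ⟨hc2, rfl⟩
          · exact Or.inr (Or.inr hx)
        · rintro (⟨_, rfl⟩ | ⟨_, rfl⟩ | hx)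
          · exact Or.inr (Or.inl rfl)
          · exact Or.inl rfl
          · exact Or.inr (Or.inr hx)
    · have hr2v : st.nxt.getD (L.getD (t+1) 0) n = n := by rw [hr2, if_neg hc2]
      rw [hr2v, if_neg (lt_irrefl n), if_neg (lt_irrefl n), hprv t htL]
      by_cases hc0 : t = 0
      · rw [if_pos hc0, if_neg (by omega : ¬ (0:Int) ≤ -1)]
        constructor
        · intro hx
          exact Or.inr (Or.inr hx)
        · rintro (⟨h, _⟩ | ⟨ht0, rfl⟩ | hx)
          · omega
          · omega
          · exact hx
      · have hprevA : L.getD (t-1) 0 ≠ L.getD t 0 := hne' _ _ (by omega) htL (by omega)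
        rw [if_neg hc0, if_pos (Int.natCast_nonneg _), Int.toNat_natCast,
          pvGetD_set_ne st.size _ 0 (fun h => hprevA h.symm), hsetA,
          pvMem_push]
        constructor
        · rintro (rfl | hx)
          · exact Or.inr (Or.inl ⟨by omega, rfl⟩)
          · exact Or.inr (Or.inr hx)
        · rintro (⟨h, _⟩ | ⟨_, rfl⟩ | hx)
          · omega
          · exact Or.inl rfl
          · exact Or.inr hx
  refine { hdl := ?_, hsl := ?_, hnl := ?_, hpl := ?_, hal := ?_,
           hLn := ?_, hLmono := hmono', halive := ?_, hsize := ?_, hnxt := ?_, hprv := ?_,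
           hsorted := hq_sorted, hcomp := ?_, hrange := ?_, hparts := ?_ }
  · show (st.data.set _ _).length = n
    rw [List.length_set, hdl]
  · show (st.size.set _ _).length = n
    rw [List.length_set, hsl]
  · show (st.nxt.set _ _).length = n
    rw [List.length_set, hnl]
  · show (if st.nxt.getD (L.getD (t+1) 0) n < n
        then st.prv.set (st.nxt.getD (L.getD (t+1) 0) n) ((L.getD t 0 : Nat) : Int)
        else st.prv).length = n
    split_ifs <;> simp [hpl]
  · show (st.alive.set _ _).length = n
    rw [List.length_set, hal]
  · intro x hx
    exact hLn x ((hmem' x).mp hx).1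
  · -- halive
    intro j
    show (st.alive.set (L.getD (t+1) 0) false).getD j false = _
    by_cases hjb : j = L.getD (t+1) 0
    · subst hjb
      rw [pvGetD_set_self st.alive _ false false (by rw [hal]; exact hbn)]
      simpa using hnodup_b
    · rw [pvGetD_set_ne st.alive _ _ (fun h => hjb h.symm), halive j, decide_eq_decide,
        hmem' j]
      constructor
      · intro h; exact ⟨h, hjb⟩
      · intro h; exact h.1
  · -- hsize
    intro j hj
    obtain ⟨hjL, hjb⟩ := (hmem' j).mp hj
    show (st.size.set (L.getD t 0) (pvTriple st.size L t).1).getD j 0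
      = pvChunkSizeA ((st.data.set (L.getD t 0)
          (st.data.getD (L.getD t 0) [] ++ st.data.getD (L.getD (t+1) 0) [])).getD j [])
    by_cases hja : j = L.getD t 0
    · subst hja
      rw [hsetA, pvGetD_set_self st.data _ _ [] (by rw [hdl]; exact han),
        pvChunkSizeA_append, hs', hsize _ ha_mem, hsize _ hb_mem]
    · rw [pvGetD_set_ne st.size _ _ (fun h => hja h.symm),
        pvGetD_set_ne st.data _ _ (fun h => hja h.symm)]
      exact hsize j hjL
  · -- hnxt
    intro i hi
    rw [hlen'] at hi
    show (st.nxt.set (L.getD t 0) (st.nxt.getD (L.getD (t+1) 0) n)).getD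
        ((L.eraseIdx (t+1)).getD i 0) n = _
    rw [hgetD' i hi]
    by_cases hit : i = t
    · subst hit
      rw [if_pos (by omega),
        pvGetD_set_self st.nxt _ _ n (by rw [hnl]; exact han), hr2, hlen']
      by_cases h : i + 1 < L.length - 1
      · rw [if_pos (by omega), if_pos h, hgetD' (i+1) (by omega), if_neg (by omega)]
      · rw [if_neg (by omega), if_neg h]
    · by_cases hlt : i < t + 1
      · rw [if_pos hlt,
          pvGetD_set_ne st.nxt _ _ (hne' _ _ htL (by omega) (by omega)),
          hnxt i (by omega), if_pos (by omega), hlen', if_pos (by omega),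
          hgetD' (i+1) (by omega), if_pos (by omega)]
      · rw [if_neg hlt,
          pvGetD_set_ne st.nxt _ _ (hne' _ _ htL (by omega) (by omega)),
          hnxt (i+1) (by omega), hlen']
        by_cases h : i + 2 < L.length
        · rw [if_pos h, if_pos (by omega), hgetD' (i+1) (by omega), if_neg (by omega)]
        · rw [if_neg h, if_neg (by omega)]
  · -- hprv
    intro i hi
    rw [hlen'] at hi
    show (if st.nxt.getD (L.getD (t+1) 0) n < n
        then st.prv.set (st.nxt.getD (L.getD (t+1) 0) n) ((L.getD t 0 : Nat) : Int)
        else st.prv).getD ((L.eraseIdx (t+1)).getD i 0) (-1) = _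
    rw [hgetD' i hi]
    by_cases hc2 : t + 2 < L.length
    · have hr2v : st.nxt.getD (L.getD (t+1) 0) n = L.getD (t+2) 0 := by rw [hr2, if_pos hc2]
      have hr2n : L.getD (t+2) 0 < n := hLn _ (pvGetD_mem (by omega))
      rw [hr2v, if_pos hr2n]
      by_cases hit : i = t + 1
      · subst hit
        rw [if_neg (by omega),
          pvGetD_set_self st.prv _ _ (-1) (by rw [hpl]; exact hr2n),
          if_neg (by omega), show t + 1 - 1 = t from rfl, hgetD' t (by omega),
          if_pos (by omega)]
      · by_cases hlt : i < t + 1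
        · rw [if_pos hlt,
            pvGetD_set_ne st.prv _ _ (hne' _ _ (by omega) (by omega) (by omega)),
            hprv i (by omega)]
          by_cases h0 : i = 0
          · rw [if_pos h0, if_pos h0]
          · rw [if_neg h0, if_neg h0, hgetD' (i-1) (by omega), if_pos (by omega)]
        · rw [if_neg hlt,
            pvGetD_set_ne st.prv _ _ (hne' _ _ (by omega) (by omega) (by omega)),
            hprv (i+1) (by omega), if_neg (by omega), if_neg (by omega),
            hgetD' (i-1) (by omega), if_neg (by omega)]
          congr 2
          omega
    · have hr2v : st.nxt.getD (L.getD (t+1) 0) n = n := by rw [hr2, if_neg hc2]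
      rw [hr2v, if_neg (lt_irrefl n)]
      have hlt : i < t + 1 := by omega
      rw [if_pos hlt, hprv i (by omega)]
      by_cases h0 : i = 0
      · rw [if_pos h0, if_pos h0]
      · rw [if_neg h0, if_neg h0, hgetD' (i-1) (by omega), if_pos (by omega)]
  · -- hcomp
    intro i hi
    rw [hlen'] at hi
    rw [hq_mem]
    have hszM : (pvMergeStep n st (pvTriple st.size L t).1 (L.getD t 0) (L.getD (t+1) 0) rest).size
        = st.size.set (L.getD t 0) (pvTriple st.size L t).1 := rfl
    rw [hszM]
    by_cases hit : i = t
    · subst hit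
      have e : pvTriple (st.size.set (L.getD i 0) (pvTriple st.size L i).1) (L.eraseIdx (i+1)) i
          = ((pvTriple st.size L i).1 + st.size.getD (L.getD (i+2) 0) 0, L.getD i 0, L.getD (i+2) 0) := by
        unfold pvTriple
        rw [hgetD' i (by omega), hgetD' (i+1) (by omega), if_pos (by omega), if_neg (by omega),
          pvGetD_set_self st.size _ _ 0 (by rw [hsl]; exact han),
          pvGetD_set_ne st.size _ 0 (hne' i (i+1+1) htL (by omega) (by omega))]
      exact Or.inl ⟨by omega, e⟩
    · by_cases hi1t : i + 1 = t
      · have e : pvTriple (st.size.set (L.getD t 0) (pvTriple st.size L t).1) (L.eraseIdx (t+1)) i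
            = (st.size.getD (L.getD (t-1) 0) 0 + (pvTriple st.size L t).1, L.getD (t-1) 0, L.getD t 0) := by
          unfold pvTriple
          rw [hgetD' i (by omega), hgetD' (i+1) (by omega), if_pos (by omega), if_pos (by omega),
            pvGetD_set_ne st.size _ 0 (hne' t i htL (by omega) (by omega)),
            show L.getD (i+1) 0 = L.getD t 0 from by rw [hi1t],
            pvGetD_set_self st.size _ _ 0 (by rw [hsl]; exact han),
            show t - 1 = i from by omega]
        exact Or.inr (Or.inl ⟨by omega, e⟩)
      · by_cases hia : i < t
        · have e : pvTriple (st.size.set (L.getD t 0) (pvTriple st.size L t).1) (L.eraseIdx (t+1)) i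
              = pvTriple st.size L i := by
            unfold pvTriple
            rw [hgetD' i (by omega), hgetD' (i+1) (by omega), if_pos (by omega), if_pos (by omega),
              pvGetD_set_ne st.size _ 0 (hne' t i htL (by omega) (by omega)),
              pvGetD_set_ne st.size _ 0 (hne' t (i+1) htL (by omega) (by omega))]
          rw [e]
          exact Or.inr (Or.inr (hmem_rest i (by omega) (by omega)))
        · have e : pvTriple (st.size.set (L.getD t 0) (pvTriple st.size L t).1) (L.eraseIdx (t+1)) i
              = pvTriple st.size L (i+1) := by
            unfold pvTriple
            rw [hgetD' i (by omega), hgetD' (i+1) (by omega), if_neg (by omega), if_neg (by omega),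
              pvGetD_set_ne st.size _ 0 (hne' t (i+1) htL (by omega) (by omega)),
              pvGetD_set_ne st.size _ 0 (hne' t (i+1+1) htL (by omega) (by omega))]
          rw [e]
          exact Or.inr (Or.inr (hmem_rest (i+1) (by omega) (by omega)))
  · -- hrange
    intro e he
    rw [hq_mem] at he
    rcases he with ⟨h2, rfl⟩ | ⟨h0, rfl⟩ | he
    · exact ⟨han, hLn _ (pvGetD_mem (by omega))⟩
    · exact ⟨hLn _ (pvGetD_mem (by omega)), han⟩
    · exact hrange e (by rw [hpq]; exact List.mem_cons_of_mem _ he)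
  · -- hparts
    show st.parts - 1 = _
    rw [hparts, hlen']
    omega

theorem pvAbs_merge {n : Nat} {L : List Nat} {st : PvB} {t : Nat}
    {rest : List (Int × Nat × Nat)}
    (hInv : PvInv n L st) (ht : t + 1 < L.length)
    (_hpq : st.pq = pvTriple st.size L t :: rest) :
    (L.eraseIdx (t+1)).map (fun j =>
        (pvMergeStep n st (pvTriple st.size L t).1 (L.getD t 0) (L.getD (t+1) 0) rest).data.getD j [])
      = (L.map (fun j => st.data.getD j [])).take t
        ++ [(L.map (fun j => st.data.getD j [])).getD t []
            ++ (L.map (fun j => st.data.getD j [])).getD (t+1) []]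
        ++ (L.map (fun j => st.data.getD j [])).drop (t+2) := by
  obtain ⟨hdl, hsl, hnl, hpl, hal, hLn, hLmono, halive, hsize, hnxt, hprv, hsorted, hcomp, hrange, hparts⟩ := hInv
  have htL : t < L.length := by omega
  have han : L.getD t 0 < n := hLn _ (pvGetD_mem htL)
  have hMd : (pvMergeStep n st (pvTriple st.size L t).1 (L.getD t 0) (L.getD (t+1) 0) rest).data
      = st.data.set (L.getD t 0)
          (st.data.getD (L.getD t 0) [] ++ st.data.getD (L.getD (t+1) 0) []) := rfl
  have htake : L.take (t+1) = L.take t ++ [L.getD t 0] := by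
    rw [List.take_add_one, List.getElem?_eq_getElem htL, List.getD_eq_getElem _ _ htL]
    rfl
  rw [List.eraseIdx_eq_take_drop_succ, hMd, htake, List.map_append, List.map_append,
    ← List.map_take, ← List.map_drop, pvGetD_map _ L t [] 0 htL, pvGetD_map _ L (t+1) [] 0 ht]
  congr 1
  congr 1
  · apply List.map_congr_left
    intro x hx
    obtain ⟨j, hj, hEq⟩ := List.mem_take_iff_getElem.mp hx
    have hjt : j < t := by omega
    apply pvGetD_set_ne st.data _ _
    intro hcon
    have : t = j := pvL_inj hLmono htL (by omega)
      (by rw [List.getD_eq_getElem _ _ (show j < L.length by omega), hEq, ← hcon])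
    omega
  · show [_] = [_]
    congr 1
    exact pvGetD_set_self st.data _ _ [] (by rw [hdl]; exact han)
  · apply List.map_congr_left
    intro x hx
    obtain ⟨j, hj, hEq⟩ := List.getElem_of_mem hx
    rw [List.getElem_drop] at hEq
    have hjlen : t + 2 + j < L.length := by
      have := hj
      rw [List.length_drop] at this
      omega
    apply pvGetD_set_ne st.data _ _
    intro hcon
    have : t = t + 2 + j := pvL_inj hLmono htL hjlen
      (by rw [List.getD_eq_getElem _ _ hjlen, hEq, ← hcon])
    omega

theorem pvLoopBQ_succ (n : Nat) (mp : Int) (f : Nat) (st : PvB) :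
    pvLoopBQ n mp (f+1) st =
      if st.parts > mp then
        match st.pq with
        | [] => st
        | (s, li, ri) :: rest =>
          if st.alive.getD li false ∧ st.nxt.getD li n = ri ∧ st.size.getD li 0 + st.size.getD ri 0 = s then
            pvLoopBQ n mp f (pvMergeStep n st s li ri rest)
          else
            pvLoopBQ n mp f { st with pq := rest }
      else st := rfl

-- the main simulation
theorem pvSim (n : Nat) (mp : Int) (hmp : 1 ≤ mp) :
    ∀ (fb : Nat) (L : List Nat) (st : PvB) (fa : Nat),
      PvInv n L st → L.length ≤ fa → st.pq.length + 3 * L.length ≤ fb →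
      pvFinal n (pvLoopBQ n mp fb st) = pvLoopA fa (L.map (fun j => st.data.getD j [])) mp := by
  intro fb
  induction fb with
  | zero =>
    intro L st fa hInv hfa hfb
    have hL : L = [] := List.eq_nil_of_length_eq_zero (by omega)
    subst hL
    rw [pvLoopBQ, pvFinal_eq hInv]
    cases fa with
    | zero => rfl
    | succ f =>
      rw [pvLoopA, if_neg (by simp; omega)]
  | succ fb ih =>
    intro L st fa hInv hfa hfb
    by_cases hgt : st.parts > mp
    · have hparts := hInv.hparts
      have hlen2 : 2 ≤ L.length := by omega
      have hne : st.pq ≠ [] := by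
        have h := hInv.hcomp 0 (by omega)
        intro hc
        rw [hc] at h
        cases h
      obtain ⟨⟨s, li, ri⟩, rest, hpq⟩ : ∃ h t, st.pq = h :: t := by
        cases hq : st.pq with
        | nil => exact absurd hq hne
        | cons h t => exact ⟨h, t, rfl⟩
      rw [pvLoopBQ_succ, if_pos hgt, hpq]
      dsimp only
      split_ifs with hv
      · obtain ⟨t, ht1, htrip, hfold⟩ := pvHeadArgmin hInv hpq hv hlen2
        have hli : li = L.getD t 0 := by
          have := congrArg (fun x => x.2.1) htrip
          simpa [pvTriple] using this
        have hri : ri = L.getD (t+1) 0 := by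
          have := congrArg (fun x => x.2.2) htrip
          simpa [pvTriple] using this
        have hs : s = (pvTriple st.size L t).1 := by
          have := congrArg (fun x => x.1) htrip
          simpa [pvTriple] using this
        have hpq' : st.pq = pvTriple st.size L t :: rest := by rw [hpq, htrip]
        cases fa with
        | zero => omega
        | succ fa' =>
          rw [pvLoopA, if_pos (by simp; omega)]
          rw [hfold]
          dsimp only
          rw [hli, hri, hs]
          have hInv' := pvInv_merge hInv ht1 hpq'
          have habs := pvAbs_merge hInv ht1 hpq'
          have hfuel : (pvMergeStep n st (pvTriple st.size L t).1 (L.getD t 0) (L.getD (t+1) 0) rest).pq.length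
              + 3 * (L.eraseIdx (t+1)).length ≤ fb := by
            have hp1 := pvPqLen_merge n st (pvTriple st.size L t).1 (L.getD t 0) (L.getD (t+1) 0) rest
            have hp2 : (L.eraseIdx (t+1)).length = L.length - 1 := by
              rw [List.length_eraseIdx, if_pos ht1]
            have hp3 : st.pq.length = rest.length + 1 := by rw [hpq]; rfl
            omega
          have hfa' : (L.eraseIdx (t+1)).length ≤ fa' := by
            rw [List.length_eraseIdx, if_pos ht1]
            omega
          rw [ih _ _ fa' hInv' hfa' hfuel, habs]
      · have hInv' := pvInv_drop hInv hpq hv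
        have hfuel : rest.length + 3 * L.length ≤ fb := by
          have : st.pq.length = rest.length + 1 := by rw [hpq]; rfl
          omega
        exact ih L { st with pq := rest } fa hInv' hfa hfuel
    · rw [pvLoopBQ_succ, if_neg hgt, pvFinal_eq hInv]
      have hparts := hInv.hparts
      cases fa with
      | zero => rfl
      | succ f =>
        rw [pvLoopA, if_neg (by simp; omega)]

-- ===== VERDICT (by name: the statement is the Claim_ definition above) =====
theorem merge_to_limit_spec : Claim_equal_merge_to_limit := by
  intro chunks mp _
  unfold Spec_merge_to_limit merge_to_limit merge_to_limit_alt
  by_cases h0 : mp ≤ 0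
  · rw [if_pos h0, if_pos h0]
  · rw [if_neg h0, if_neg h0]
    by_cases h1 : (chunks.length : Int) ≤ mp
    · rw [if_pos h1]
      cases hc : chunks.length with
      | zero => rfl
      | succ k =>
        rw [pvLoopA, if_neg (by omega)]
    · rw [if_neg h1]
      have hmp1 : (1 : Int) ≤ mp := by omega
      have hsim := pvSim chunks.length mp hmp1 (4 * chunks.length + 1)
        (List.range chunks.length) (pvInitB chunks) chunks.length
        (pvInv_init chunks) (by simp)
        (by rw [pvInit_pqlen]; simp [List.length_range]; omega)
      rw [pvInit_abs] at hsim
      exact hsim.symm
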